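-- pv_equiv track=rewrite | github.com/UrdanetaAp/Hack_python2 | hack_6.py | fn_hack_6
-- ===== SOURCE A (Python) =====
-- def fn_hack_6(s):
--     result = []
--
--     if not s:
--         return ["0"]
--
--     for i, _ in enumerate(s, start=1):
--         if i % 2 == 1:
--             result.append(str(i))
--         else:
--             result.append("-")
--
--     return result
-- ===== SOURCE B (Python) =====
-- def fn_hack_6(s):
--     if not s:
--         return ["0"]
--     n = len(s)
--     result = ["-"] * n
--     result[::2] = [str(i) for i in range(1, n + 1, 2)]
--     return result
-- ===== Notes on version B (the rewrite author's own statement) =====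
-- stated objective: alternative
-- what changed: Replaces A's per-element enumerate loop with an even/odd branch by an initialize-all-dashes list plus one strided slice assignment that overwrites the 0-based even positions with the odd numbers.
import Mathlib
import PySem

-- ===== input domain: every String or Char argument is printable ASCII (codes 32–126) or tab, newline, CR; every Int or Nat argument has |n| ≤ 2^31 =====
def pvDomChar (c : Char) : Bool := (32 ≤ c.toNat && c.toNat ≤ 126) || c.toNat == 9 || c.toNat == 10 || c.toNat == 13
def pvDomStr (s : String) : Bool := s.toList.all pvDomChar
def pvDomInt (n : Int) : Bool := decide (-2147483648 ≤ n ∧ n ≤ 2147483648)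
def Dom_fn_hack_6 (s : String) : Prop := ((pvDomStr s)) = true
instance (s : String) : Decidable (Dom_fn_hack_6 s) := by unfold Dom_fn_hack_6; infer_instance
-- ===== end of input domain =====

-- B builds a full list of dashes and overwrites the even 0-based positions by a stride fill,
-- instead of A's per-element even/odd branch inside one enumerate loop (objective: alternative).

-- ===== PORT A =====
def fn_hack_6 (s : String) : List String :=
  if s.toList = [] then ["0"]
  else
    (PySem.List.enumerate s.toList 1).foldl
      (fun result p =>
        result ++ [if PySem.Int.mod p.1 2 == 1 then PySem.Int.toStr p.1 else "-"]) []

-- ===== PORT B =====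
-- result[::2] = vals : overwrite positions 0,2,4,… of result with vals, step for step
def strideFill2 : List String → List String → List String
  | [], _ => []
  | r, [] => r
  | _ :: rest, v :: vs =>
    match rest with
    | [] => [v]
    | y :: rest' => v :: y :: strideFill2 rest' vs

def fn_hack_6_alt (s : String) : List String :=
  if s.toList = [] then ["0"]
  else
    let n : Int := PySem.Str.len s
    strideFill2 (List.replicate n.toNat "-")
      ((PySem.List.pyRange 1 (n + 1) 2).map PySem.Int.toStr)

-- ===== PRECONDITION & SPEC =====
def Spec_fn_hack_6 (s : String) (out : List String) : Prop := out = fn_hack_6_alt s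
instance (s : String) (out : List String) : Decidable (Spec_fn_hack_6 s out) := by unfold Spec_fn_hack_6; infer_instance

-- ===== CLAIM (what is proved, stated in full; the proofs are below) =====
def Claim_equal_fn_hack_6 : Prop := ∀ (s : String), Dom_fn_hack_6 s → Spec_fn_hack_6 s (fn_hack_6 s)

-- ===== LEMMAS AND PROOFS =====

/-- Proof-side description of the output: position k (0-based) holds str(i+k) when i+k is odd. -/
def pvGen : Int → Nat → List String
  | _, 0 => []
  | i, n+1 =>
    (if PySem.Int.mod i 2 == 1 then PySem.Int.toStr i else "-") :: pvGen (i+1) n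

lemma foldA (l : List Char) : ∀ (i : Int) (acc : List String),
    (PySem.List.enumerate l i).foldl
      (fun result p =>
        result ++ [if PySem.Int.mod p.1 2 == 1 then PySem.Int.toStr p.1 else "-"]) acc
      = acc ++ pvGen i l.length := by
  induction l with
  | nil => intro i acc; simp [PySem.List.enumerate, pvGen]
  | cons x xs ih =>
    intro i acc
    rw [PySem.List.enumerate_cons]
    simp only [List.foldl_cons, ih (i+1), pvGen, List.length_cons]
    simp

lemma pyRange_two_nil (a b : Int) (h : b ≤ a) : PySem.List.pyRange a b 2 = [] := by
  rw [PySem.List.pyRange_of_pos a b (by norm_num)]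
  simp [show ¬ a < b by omega]

lemma pyRange_two_cons (a b : Int) (h : a < b) :
    PySem.List.pyRange a b 2 = a :: PySem.List.pyRange (a+2) b 2 := by
  rw [PySem.List.pyRange_of_pos a b (by norm_num),
      PySem.List.pyRange_of_pos (a+2) b (by norm_num)]
  have hM : (if a < b then ((b - a + 2 - 1) / 2).toNat else 0)
      = (if a + 2 < b then ((b - (a+2) + 2 - 1) / 2).toNat else 0) + 1 := by
    split_ifs <;> omega
  rw [hM, List.range_succ_eq_map]
  simp only [List.map_cons, List.map_map, Nat.cast_zero, mul_zero, add_zero]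
  congr 1
  have hf : ((fun k : Nat => a + 2 * (k:Int)) ∘ Nat.succ) = fun k : Nat => a + 2 + 2 * (k:Int) := by
    funext k
    simp [Function.comp]
    ring
  rw [hf]

lemma fillB : ∀ (n : Nat) (i : Int), PySem.Int.mod i 2 = 1 →
    strideFill2 (List.replicate n "-")
      ((PySem.List.pyRange i (i + n) 2).map PySem.Int.toStr) = pvGen i n
  | 0, i, _ => by
    rw [show i + ((0:Nat):Int) = i by push_cast; ring, pyRange_two_nil i i (le_refl i)]
    rfl
  | 1, i, h => by
    rw [show i + ((1:Nat):Int) = i + 1 by push_cast; ring]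
    rw [pyRange_two_cons i (i + 1) (by omega), pyRange_two_nil (i+2) (i+1) (by omega)]
    simp only [List.map_cons, List.map_nil, List.replicate, strideFill2, pvGen, h]
    norm_num
  | n+2, i, h => by
    have h2 : PySem.Int.mod (i+2) 2 = 1 := by
      rw [PySem.Int.mod_eq_emod_of_pos (by norm_num)] at h ⊢; omega
    have h1 : PySem.Int.mod (i+1) 2 = 0 := by
      rw [PySem.Int.mod_eq_emod_of_pos (by norm_num)] at h ⊢; omega
    have hc : PySem.List.pyRange i (i + ((n:Int)+2)) 2
        = i :: PySem.List.pyRange (i+2) ((i+2) + n) 2 := by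
      rw [pyRange_two_cons i _ (by omega)]
      congr 1
      congr 1
      ring
    rw [show ((n+2 : Nat) : Int) = (n:Int) + 2 by push_cast; ring] at *
    rw [hc]
    simp only [List.replicate, List.map_cons, strideFill2, pvGen, h, h1]
    rw [fillB n (i+2) h2]
    rw [show i + 1 + 1 = i + 2 by ring]
    norm_num

-- ===== VERDICT (by name: the statement is the Claim_ definition above) =====
theorem fn_hack_6_spec : Claim_equal_fn_hack_6 := by
  intro s _
  unfold Spec_fn_hack_6 fn_hack_6 fn_hack_6_alt
  by_cases hs : s.toList = []
  · simp [hs]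
  · simp only [hs, ite_false]
    rw [foldA s.toList 1 []]
    have hmod : PySem.Int.mod (1:Int) 2 = 1 := by decide
    have := fillB s.toList.length 1 hmod
    rw [show (1:Int) + (s.toList.length : Int) = (PySem.Str.len s) + 1 by
          simp [PySem.Str.len_eq]; ring] at this
    rw [show (PySem.Str.len s).toNat = s.toList.length by simp [PySem.Str.len_eq]]
    rw [this]
    simp
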